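-- pv_equiv track=rewrite | github.com/rf-iasys/OEIS | OEIS_.py | A000325
-- ===== SOURCE A (Python) =====
-- def A000325(n):
--     marked = []
--     current = 1
--     k = 1
--
--     while len(marked) < n:
--         marked.append(k)
--         k += (k**2)*current//(k**2)
--         current += current + 1
--
--     return [1] + marked
-- ===== SOURCE B (Python) =====
-- def A000325(n):
--     return [2**j - j for j in range(max(n, 0) + 1)]
-- ===== Notes on version B (the rewrite author's own statement) =====
-- stated objective: simpler
-- what changed: Replaces the accumulator-threading while-loop (running k and current) by a one-line comprehension that emits each term independently from its closed form (a power of two minus the index), no maintained state.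
import Mathlib
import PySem

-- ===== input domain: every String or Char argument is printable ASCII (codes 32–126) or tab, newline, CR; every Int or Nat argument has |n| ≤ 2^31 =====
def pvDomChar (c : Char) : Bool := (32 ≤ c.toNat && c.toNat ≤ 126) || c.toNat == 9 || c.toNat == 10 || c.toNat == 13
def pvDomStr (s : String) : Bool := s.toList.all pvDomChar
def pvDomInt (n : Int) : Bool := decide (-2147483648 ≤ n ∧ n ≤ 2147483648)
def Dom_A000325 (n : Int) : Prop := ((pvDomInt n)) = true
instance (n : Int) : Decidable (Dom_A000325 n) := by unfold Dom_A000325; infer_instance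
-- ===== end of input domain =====

-- B replaces A's accumulator-threading while-loop by a closed-form comprehension 2**j - j (objective: simpler).

-- ===== PORT A =====
-- while len(marked) < n: marked.append(k); k += (k**2)*current//(k**2); current += current + 1
def A000325_loop (n : Int) (marked : List Int) (current : Int) (k : Int) : List Int :=
  if h : (marked.length : Int) < n then
    A000325_loop n (marked ++ [k])
      (current + (current + 1))
      (k + PySem.Int.floordiv ((k ^ 2) * current) (k ^ 2))
  else
    marked
termination_by (n - marked.length).toNat
decreasing_by simp only [List.length_append, List.length_cons, List.length_nil]; omega

def A000325 (n : Int) : List Int :=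
  [1] ++ A000325_loop n [] 1 1

-- ===== PORT B =====
-- [2**j - j for j in range(max(n, 0) + 1)]; j ≥ 0 on every element of the range, so 2**j = 2 ^ j.toNat exactly
def A000325_alt (n : Int) : List Int :=
  (PySem.List.pyRange 0 (max n 0 + 1) 1).map (fun j => 2 ^ j.toNat - j)

-- ===== PRECONDITION & SPEC =====
def Spec_A000325 (n : Int) (out : List Int) : Prop := out = A000325_alt n
instance (n : Int) (out : List Int) : Decidable (Spec_A000325 n out) := by unfold Spec_A000325; infer_instance

-- ===== CLAIM (what is proved, stated in full; the proofs are below) =====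
def Claim_equal_A000325 : Prop := ∀ (n : Int), Dom_A000325 n → Spec_A000325 n (A000325 n)

-- ===== LEMMAS AND PROOFS =====

lemma pv_two_pow_ge (t : Nat) : (t : Int) + 1 ≤ 2 ^ t := by
  induction t with
  | zero => simp
  | succ m ih => push_cast; rw [pow_succ]; push_cast at ih; omega

lemma pv_floordiv_sq_mul (k c : Int) (hk : k ≠ 0) :
    PySem.Int.floordiv ((k ^ 2) * c) (k ^ 2) = c := by
  have hpos : (0:Int) < k ^ 2 := by positivity
  rw [PySem.Int.floordiv_eq_ediv_of_pos hpos]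
  exact Int.mul_ediv_cancel_left c (by positivity)

lemma pv_loop_eq (n : Int) : ∀ (c : Nat) (marked : List Int),
    (n - marked.length).toNat = c →
    A000325_loop n marked (2 ^ (marked.length + 1) - 1)
      (2 ^ (marked.length + 1) - ((marked.length : Int) + 1)) =
    marked ++ (List.range c).map
      (fun i => (2:Int) ^ (marked.length + 1 + i) - ((marked.length : Int) + 1 + i)) := by
  intro c
  induction c with
  | zero =>
    intro marked h
    rw [A000325_loop]
    have : ¬ ((marked.length : Int) < n) := by omega
    simp [this]
  | succ m ih =>
    intro marked h
    have hlt : (marked.length : Int) < n := by omega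
    rw [A000325_loop]
    simp only [hlt, dif_pos]
    have hk : (2:Int) ^ (marked.length + 1) - ((marked.length : Int) + 1) ≠ 0 := by
      have := pv_two_pow_ge (marked.length + 1)
      push_cast at this ⊢; omega
    rw [pv_floordiv_sq_mul _ _ hk]
    have hlen : (marked ++ [2 ^ (marked.length + 1) - ((marked.length : Int) + 1)]).length
        = marked.length + 1 := by simp
    have harg := ih (marked ++ [2 ^ (marked.length + 1) - ((marked.length : Int) + 1)])
      (by rw [hlen]; push_cast; omega)
    rw [hlen] at harg
    push_cast at harg
    have hc : (2:Int) ^ (marked.length + 1) - 1 + ((2 ^ (marked.length + 1) - 1) + 1)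
        = 2 ^ (marked.length + 1 + 1) - 1 := by ring
    have hk2 : (2:Int) ^ (marked.length + 1) - ((marked.length : Int) + 1)
        + (2 ^ (marked.length + 1) - 1)
        = 2 ^ (marked.length + 1 + 1) - ((marked.length : Int) + 1 + 1) := by
      ring
    have hmap : List.map ((fun i => (2:Int) ^ (marked.length + 1 + i) - ((marked.length : Int) + 1 + i)) ∘ Nat.succ) (List.range m)
        = List.map (fun i => (2:Int) ^ (marked.length + 1 + 1 + i) - ((marked.length : Int) + 1 + 1 + i)) (List.range m) := by
      apply List.map_congr_left
      intro i _
      simp only [Function.comp_apply, Nat.succ_eq_add_one]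
      push_cast
      ring
    rw [hc, hk2, harg, List.range_succ_eq_map, List.map_cons, List.map_map, hmap]
    simp

lemma pv_alt_eq (n : Int) :
    A000325_alt n = (List.range (n.toNat + 1)).map (fun j : Nat => (2:Int) ^ j - (j:Int)) := by
  unfold A000325_alt
  rw [PySem.List.pyRange_one]
  have h1 : (max n 0 + 1 - 0).toNat = n.toNat + 1 := by omega
  rw [h1, List.map_map]
  apply List.map_congr_left
  intro j hj
  simp [Function.comp_apply]

-- ===== VERDICT (by name: the statement is the Claim_ definition above) =====
theorem A000325_spec : Claim_equal_A000325 := by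
  intro n _
  unfold Spec_A000325
  rw [pv_alt_eq]
  unfold A000325
  have h0 := pv_loop_eq n (n - ([]:List Int).length).toNat [] rfl
  simp only [List.length_nil, Nat.cast_zero, Int.sub_zero] at h0
  norm_num at h0
  rw [h0]
  rw [List.range_succ_eq_map]
  simp only [List.map_cons, List.map_map]
  have hn : (n - 0).toNat = n.toNat := by omega
  rw [hn] at *
  norm_num
  intro i _
  ring
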